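-- pv_equiv track=rewrite | github.com/codergirl-al/TUM_P4MS | 04/homework/hw03.py | solution
-- ===== SOURCE A (Python) =====
-- def solution(input_string: str) -> str:
-- 	result = ""
-- 	n = len(input_string)
-- 	for i in range(n):
-- 		if (i > 0 and input_string[i] == input_string[i - 1]) or (i < n - 1 and input_string[i] == input_string[i + 1]):
-- 			continue
-- 		result += input_string[i]
-- 	return result
-- ===== SOURCE B (Python) =====
-- def solution(input_string: str) -> str:
--     # Run-length view: scan maximal runs of equal chars; keep a char iff its run has length 1.
--     out = []
--     i = 0
--     n = len(input_string)
--     while i < n: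
--         j = i
--         while j < n and input_string[j] == input_string[i]:
--             j += 1
--         if j - i == 1:
--             out.append(input_string[i])
--         i = j
--     return "".join(out)
-- ===== Notes on version B (the rewrite author's own statement) =====
-- stated objective: alternative
-- what changed: Replaced A's per-index comparisons with the left and right neighbors by a run-length scan (groupby-style): split the string into maximal runs of equal characters and keep exactly the characters of length-1 runs.
import Mathlib
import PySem

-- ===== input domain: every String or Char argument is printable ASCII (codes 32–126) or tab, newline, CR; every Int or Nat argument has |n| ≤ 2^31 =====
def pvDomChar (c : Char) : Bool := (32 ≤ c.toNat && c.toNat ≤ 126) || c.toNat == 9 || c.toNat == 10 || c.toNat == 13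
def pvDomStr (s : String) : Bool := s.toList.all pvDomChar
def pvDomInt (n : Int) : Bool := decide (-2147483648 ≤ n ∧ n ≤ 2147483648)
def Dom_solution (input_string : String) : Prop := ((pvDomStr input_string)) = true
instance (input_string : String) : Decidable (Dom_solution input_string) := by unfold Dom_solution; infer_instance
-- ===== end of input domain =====

-- B replaces A's per-index left/right neighbor comparisons by a single run-length scan
-- (a char is kept iff its maximal run has length 1); objective: alternative algorithm.

-- ===== PORT A =====
def solution (input_string : String) : String :=
  let cs := input_string.toList
  let n : Int := PySem.Str.len input_string
  String.ofList ((PySem.List.pyRange 0 n 1).foldl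
    (fun result i =>
      if (decide (0 < i) && (PySem.List.pyGetD cs i ' ' == PySem.List.pyGetD cs (i - 1) ' '))
         || (decide (i < n - 1) && (PySem.List.pyGetD cs i ' ' == PySem.List.pyGetD cs (i + 1) ' '))
      then result
      else result ++ [PySem.List.pyGetD cs i ' ']) [])

-- ===== PORT B =====
-- inner while loop of Source B: how many leading chars of the list equal c
def runLen (c : Char) : List Char → Nat
  | [] => 0
  | x :: xs => if x == c then runLen c xs + 1 else 0

-- outer while loop of Source B: consume one maximal run at a time; keep its char iff the run is a singleton
def altGo : List Char → List Char
  | [] => []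
  | c :: rest =>
    (if runLen c rest = 0 then [c] else []) ++ altGo (rest.drop (runLen c rest))
termination_by l => l.length
decreasing_by simp

def solution_alt (input_string : String) : String :=
  String.ofList (altGo input_string.toList)

-- ===== PRECONDITION & SPEC =====
def Spec_solution (input_string : String) (out : String) : Prop := out = solution_alt input_string
instance (input_string : String) (out : String) : Decidable (Spec_solution input_string out) := by unfold Spec_solution; infer_instance

-- ===== CLAIM (what is proved, stated in full; the proofs are below) =====
def Claim_equal_solution : Prop := ∀ (input_string : String), Dom_solution input_string → Spec_solution input_string (solution input_string)

-- ===== LEMMAS AND PROOFS =====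

def keep (p : Option Char) : List Char → List Char
  | [] => []
  | c :: rest => (if p = some c ∨ rest.head? = some c then [] else [c]) ++ keep (some c) rest

def prevAt (p : Option Char) (cs : List Char) (k : Nat) : Option Char :=
  if k = 0 then p else some (cs.getD (k - 1) ' ')

def okP (p : Option Char) (cs : List Char) (k : Nat) : Bool :=
  !((prevAt p cs k == some (cs.getD k ' '))
    || (decide (k + 1 < cs.length) && (cs.getD k ' ' == cs.getD (k + 1) ' ')))

lemma okP_succ (p : Option Char) (c : Char) (rest : List Char) (j : Nat) :
    okP p (c :: rest) (j + 1) = okP (some c) rest j := by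
  have hd : decide (2 ≤ rest.length) = decide (1 < rest.length) := by
    simp [decide_eq_decide]; omega
  cases j <;> simp [okP, prevAt, hd]

lemma okP_zero (p : Option Char) (c : Char) (rest : List Char) :
    okP p (c :: rest) 0 = !decide (p = some c ∨ rest.head? = some c) := by
  cases rest with
  | nil => cases p <;> simp [okP, prevAt, Bool.beq_eq_decide_eq]
  | cons x xs =>
    cases p <;> simp [okP, prevAt, eq_comm, Bool.beq_eq_decide_eq]

lemma keep_filter (cs : List Char) : ∀ p,
    ((List.range cs.length).filter (okP p cs)).map (fun k => cs.getD k ' ') = keep p cs := by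
  induction cs with
  | nil => intro p; simp [keep]
  | cons c rest ih =>
    intro p
    rw [List.length_cons, List.range_succ_eq_map, List.filter_cons]
    have htail : (List.filter (okP p (c :: rest)) (List.map Nat.succ (List.range rest.length))).map
        (fun k => (c :: rest).getD k ' ')
        = ((List.range rest.length).filter (okP (some c) rest)).map (fun k => rest.getD k ' ') := by
      rw [List.filter_map, List.map_map]
      congr 1
      · congr 1; funext j; simpa using okP_succ p c rest j
    rw [okP_zero]
    by_cases h : p = some c ∨ rest.head? = some c
    · simp only [h, decide_true, Bool.not_true, Bool.false_eq_true, if_false]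
      rw [htail, ih]
      simp [keep, h]
    · simp only [h, decide_false, Bool.not_false, if_true, List.map_cons]
      rw [htail, ih]
      simp [keep, h]

lemma solution_eq_keep (s : String) : solution s = String.ofList (keep none s.toList) := by
  unfold solution
  dsimp only
  have hstep : (fun (result : List Char) (i : Int) =>
      if (decide (0 < i) && (PySem.List.pyGetD s.toList i ' ' == PySem.List.pyGetD s.toList (i - 1) ' '))
         || (decide (i < PySem.Str.len s - 1) && (PySem.List.pyGetD s.toList i ' ' == PySem.List.pyGetD s.toList (i + 1) ' '))
      then result
      else result ++ [PySem.List.pyGetD s.toList i ' '])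
      = (fun (result : List Char) (i : Int) =>
      if (!((decide (0 < i) && (PySem.List.pyGetD s.toList i ' ' == PySem.List.pyGetD s.toList (i - 1) ' '))
         || (decide (i < PySem.Str.len s - 1) && (PySem.List.pyGetD s.toList i ' ' == PySem.List.pyGetD s.toList (i + 1) ' ')))) = true
      then result ++ [PySem.List.pyGetD s.toList i ' '] else result) := by
    funext r i
    cases h : (decide (0 < i) && (PySem.List.pyGetD s.toList i ' ' == PySem.List.pyGetD s.toList (i - 1) ' '))
         || (decide (i < PySem.Str.len s - 1) && (PySem.List.pyGetD s.toList i ' ' == PySem.List.pyGetD s.toList (i + 1) ' ')) <;> simp [h]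
  rw [hstep, PySem.List.foldl_append_if, PySem.List.pyRange_one]
  have hlen : (PySem.Str.len s - 0).toNat = s.toList.length := by
    rw [PySem.Str.len_eq]; simp
  rw [hlen]
  have hg : List.map (fun k : Nat => (0 : Int) + ↑k) (List.range s.toList.length)
      = List.map (fun k : Nat => (↑k : Int)) (List.range s.toList.length) := by
    simp
  rw [hg, List.filter_map, List.map_map]
  have hpred : ∀ k ∈ List.range s.toList.length,
      ((fun i : Int => !((decide (0 < i) && (PySem.List.pyGetD s.toList i ' ' == PySem.List.pyGetD s.toList (i - 1) ' '))
         || (decide (i < PySem.Str.len s - 1) && (PySem.List.pyGetD s.toList i ' ' == PySem.List.pyGetD s.toList (i + 1) ' ')))) ∘ (fun k : Nat => (↑k : Int))) k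
      = okP none s.toList k := by
    intro k hk
    rw [List.mem_range] at hk
    cases k with
    | zero =>
      simp only [Function.comp_apply, okP, prevAt, if_pos rfl, Nat.cast_zero]
      have h1 : decide ((0:Int) < 0) = false := by decide
      have h2 : PySem.List.pyGetD s.toList (0 : Int) ' ' = s.toList.getD 0 ' ' := by
        simpa using PySem.List.pyGetD_natCast s.toList 0 ' '
      have h3 : PySem.List.pyGetD s.toList (1 : Int) ' ' = s.toList.getD 1 ' ' := by
        simpa using PySem.List.pyGetD_natCast s.toList 1 ' '
      have h4 : decide ((0:Int) < PySem.Str.len s - 1) = decide (0 + 1 < s.toList.length) := by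
        rw [PySem.Str.len_eq]
        simp only [decide_eq_decide]
        omega
      simp [h1, h2, h3, h4]
    | succ j =>
      simp only [Function.comp_apply, okP, prevAt, if_neg (Nat.succ_ne_zero j)]
      have hc : ((j + 1 : Nat) : Int) = (j : Int) + 1 := by push_cast; ring
      have h1 : decide ((0:Int) < ((j + 1 : Nat) : Int)) = true := by simp
      have h2 : PySem.List.pyGetD s.toList ((j + 1 : Nat) : Int) ' ' = s.toList.getD (j + 1) ' ' := by
        simpa using PySem.List.pyGetD_natCast s.toList (j + 1) ' '
      have h3 : PySem.List.pyGetD s.toList (((j + 1 : Nat) : Int) - 1) ' ' = s.toList.getD j ' ' := by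
        rw [hc]
        simpa using PySem.List.pyGetD_natCast s.toList j ' '
      have h4 : PySem.List.pyGetD s.toList (((j + 1 : Nat) : Int) + 1) ' ' = s.toList.getD (j + 2) ' ' := by
        rw [hc]
        have h5 : ((j : Int) + 1 + 1) = ((j + 2 : Nat) : Int) := by push_cast; ring
        rw [h5]
        simpa using PySem.List.pyGetD_natCast s.toList (j + 2) ' '
      have h5 : decide (((j + 1 : Nat) : Int) < PySem.Str.len s - 1) = decide (j + 1 + 1 < s.toList.length) := by
        rw [PySem.Str.len_eq]
        simp only [decide_eq_decide]
        omega
      simp only [h1, h2, h3, h4, h5, Bool.true_and, Nat.add_sub_cancel]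
      simp [Bool.beq_eq_decide_eq, eq_comm]
  rw [List.filter_congr hpred, ← keep_filter s.toList none]
  congr 1
  apply List.map_congr_left
  intro k hk
  have hk' := List.mem_range.mp (List.mem_filter.mp hk).1
  simpa using PySem.List.pyGetD_natCast s.toList k ' '

lemma runLen_eq_zero (c : Char) (l : List Char) : runLen c l = 0 ↔ l.head? ≠ some c := by
  cases l with
  | nil => simp [runLen]
  | cons x xs => by_cases h : x = c <;> simp [runLen, h]

lemma keep_skip (c : Char) : ∀ l : List Char, keep (some c) (l.drop (runLen c l)) = keep (some c) l := by
  intro l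
  induction l with
  | nil => simp [runLen]
  | cons x xs ih =>
    by_cases h : x = c
    · subst h
      simp only [runLen, beq_self_eq_true, if_true, List.drop_succ_cons]
      rw [ih]
      simp [keep]
    · simp [runLen, h, keep]

lemma head_drop_runLen (c : Char) : ∀ l : List Char, (l.drop (runLen c l)).head? ≠ some c := by
  intro l
  induction l with
  | nil => simp [runLen]
  | cons x xs ih =>
    by_cases h : x = c
    · subst h; simpa [runLen] using ih
    · simp only [runLen, beq_iff_eq, h, if_false, List.drop_zero, List.head?_cons]
      exact fun hx => h (Option.some.inj hx)

lemma keep_of_head_ne (c : Char) (l : List Char) (h : l.head? ≠ some c) :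
    keep (some c) l = keep none l := by
  cases l with
  | nil => rfl
  | cons x xs =>
    have hx : ¬ (c = x) := fun hcx => h (by simp [hcx])
    simp [keep, hx]

lemma altGo_eq (l : List Char) : altGo l = keep none l := by
  induction l using altGo.induct with
  | case1 => simp [altGo, keep]
  | case2 c rest ih =>
    rw [altGo, ih, ← keep_of_head_ne c _ (head_drop_runLen c rest)]
    rw [keep_skip]
    by_cases h : rest.head? = some c
    · have h0 : runLen c rest ≠ 0 := fun hz => ((runLen_eq_zero c rest).mp hz) h
      simp [keep, h0, h]
    · have h0 : runLen c rest = 0 := (runLen_eq_zero c rest).mpr h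
      simp [keep, h0, h]

-- ===== VERDICT (by name: the statement is the Claim_ definition above) =====
theorem solution_spec : Claim_equal_solution := by
  intro s _
  unfold Spec_solution solution_alt
  rw [solution_eq_keep, altGo_eq]
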